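-- pv_equiv track=rewrite | github.com/pikiby/pikiby_data_scince_learning | Tests/Finding the minimum value of the list.py | sum_min_numbers
-- ===== SOURCE A (Python) =====
-- def sum_min_numbers(a, b, c):
--
--     list_n=[a,b,c]
--     min_n_1=list_n[0]
--     list_l_1=len(list_n)
--
--     for i in range(0,list_l_1):
--         if list_n[i]<min_n_1:
--             min_n_1=list_n[i]
--
--
--     list_n.remove(min_n_1)
--     min_n_2=list_n[0]
--     list_l=len(list_n)
--     for i in range(0,list_l):
--         if list_n[i]<min_n_2:
--             min_n_2=list_n[i]
--
--     return min_n_1+min_n_2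
-- ===== SOURCE B (Python) =====
-- def sum_min_numbers(a, b, c):
--     s = sorted([a, b, c])
--     return s[0] + s[1]
-- ===== Notes on version B (the rewrite author's own statement) =====
-- stated objective: simpler
-- what changed: Replaces the two explicit minimum-scanning loops plus list.remove with a single sort of the three values and adding the first two.
import Mathlib
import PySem

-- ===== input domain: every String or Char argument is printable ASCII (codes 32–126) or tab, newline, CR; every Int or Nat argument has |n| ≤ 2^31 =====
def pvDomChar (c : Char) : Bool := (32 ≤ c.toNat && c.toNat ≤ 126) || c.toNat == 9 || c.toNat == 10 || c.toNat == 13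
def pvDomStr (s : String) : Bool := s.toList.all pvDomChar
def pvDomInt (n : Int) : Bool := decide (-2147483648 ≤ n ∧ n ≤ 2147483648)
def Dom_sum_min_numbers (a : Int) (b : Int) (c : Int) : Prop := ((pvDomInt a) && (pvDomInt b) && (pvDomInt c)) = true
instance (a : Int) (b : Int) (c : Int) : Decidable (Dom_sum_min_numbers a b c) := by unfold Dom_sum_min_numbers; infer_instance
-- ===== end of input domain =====

-- ===== PORT A =====
-- Literal port of A: min over the list via a range loop, remove the first
-- occurrence of that min, then a second min loop over the remainder.
def pvMinLoop (list_n : List Int) (init : Int) (len : Int) : Int :=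
  (PySem.List.pyRange 0 len 1).foldl
    (fun min_n i =>
      if PySem.List.pyGetD list_n i 0 < min_n then PySem.List.pyGetD list_n i 0 else min_n)
    init

def sum_min_numbers (a : Int) (b : Int) (c : Int) : Int :=
  let list_n : List Int := [a, b, c]
  let min_n_1 := PySem.List.pyGetD list_n 0 0
  let list_l_1 : Int := list_n.length
  let min_n_1 := pvMinLoop list_n min_n_1 list_l_1
  let list_n := (PySem.List.remove? list_n min_n_1).getD []   -- min_n_1 ∈ list_n, so remove succeeds
  let min_n_2 := PySem.List.pyGetD list_n 0 0
  let list_l : Int := list_n.length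
  let min_n_2 := pvMinLoop list_n min_n_2 list_l
  min_n_1 + min_n_2

-- ===== PORT B =====
-- Port of B: sort the three values, add the first two.
def sum_min_numbers_alt (a : Int) (b : Int) (c : Int) : Int :=
  let s := PySem.List.sorted [a, b, c] (fun x => x) false
  PySem.List.pyGetD s 0 0 + PySem.List.pyGetD s 1 0

-- ===== PRECONDITION & SPEC =====
def Spec_sum_min_numbers (a : Int) (b : Int) (c : Int) (out : Int) : Prop := out = sum_min_numbers_alt a b c
instance (a : Int) (b : Int) (c : Int) (out : Int) : Decidable (Spec_sum_min_numbers a b c out) := by unfold Spec_sum_min_numbers; infer_instance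

-- ===== CLAIM (what is proved, stated in full; the proofs are below) =====
def Claim_equal_sum_min_numbers : Prop := ∀ (a : Int) (b : Int) (c : Int), Dom_sum_min_numbers a b c → Spec_sum_min_numbers a b c (sum_min_numbers a b c)

-- ===== LEMMAS AND PROOFS =====

lemma pvMinLoop3 (a b c : Int) : pvMinLoop [a,b,c] a 3 = min a (min b c) := by
  unfold pvMinLoop
  rw [show PySem.List.pyRange 0 3 1 = [0,1,2] from by decide]
  simp [PySem.List.pyGetD, PySem.List.pyGet?, PySem.List.pyIdx?]
  split_ifs <;> omega

lemma pvMinLoop2 (x y : Int) : pvMinLoop [x,y] x 2 = min x y := by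
  unfold pvMinLoop
  rw [show PySem.List.pyRange 0 2 1 = [0,1] from by decide]
  simp [PySem.List.pyGetD, PySem.List.pyGet?, PySem.List.pyIdx?]
  split_ifs <;> omega

lemma pvA_eq (a b c : Int) : sum_min_numbers a b c = a + b + c - max a (max b c) := by
  unfold sum_min_numbers
  simp only [List.length_cons, List.length_nil]
  norm_num
  rw [pvMinLoop3]
  rcases (show a = min a (min b c) ∨ (a ≠ min a (min b c) ∧ b = min a (min b c)) ∨
      (a ≠ min a (min b c) ∧ b ≠ min a (min b c) ∧ c = min a (min b c)) by omega) with
    h | ⟨h1, h⟩ | ⟨h1, h2, h⟩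
  · rw [show PySem.List.remove? [a,b,c] (min a (min b c)) = some [b,c] by
      rw [PySem.List.remove?_eq_some_erase _ _ (by simp; omega)]
      simp only [List.erase_cons, beq_iff_eq]
      rw [if_pos (by omega)]]
    simp only [Option.getD_some, List.length_cons, List.length_nil]
    norm_num
    rw [pvMinLoop2]
    omega
  · rw [show PySem.List.remove? [a,b,c] (min a (min b c)) = some [a,c] by
      rw [PySem.List.remove?_eq_some_erase _ _ (by simp; omega)]
      simp only [List.erase_cons, beq_iff_eq]
      rw [if_neg (by omega), if_pos (by omega)]]
    simp only [Option.getD_some, List.length_cons, List.length_nil]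
    norm_num
    rw [pvMinLoop2]
    omega
  · rw [show PySem.List.remove? [a,b,c] (min a (min b c)) = some [a,b] by
      rw [PySem.List.remove?_eq_some_erase _ _ (by simp; omega)]
      simp only [List.erase_cons, beq_iff_eq]
      rw [if_neg (by omega), if_neg (by omega), if_pos (by omega)]]
    simp only [Option.getD_some, List.length_cons, List.length_nil]
    norm_num
    rw [pvMinLoop2]
    omega

lemma pvPerm3_acb (a b c : Int) : ([a,c,b] : List Int).Perm [a,b,c] :=
  List.Perm.cons a (List.Perm.swap b c [])
lemma pvPerm3_bac (a b c : Int) : ([b,a,c] : List Int).Perm [a,b,c] :=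
  List.Perm.swap a b [c]
lemma pvPerm3_bca (a b c : Int) : ([b,c,a] : List Int).Perm [a,b,c] :=
  (List.Perm.cons b (List.Perm.swap a c [])).trans (pvPerm3_bac a b c)
lemma pvPerm3_cab (a b c : Int) : ([c,a,b] : List Int).Perm [a,b,c] :=
  (List.Perm.swap a c [b]).trans (pvPerm3_acb a b c)
lemma pvPerm3_cba (a b c : Int) : ([c,b,a] : List Int).Perm [a,b,c] :=
  (List.Perm.swap b c [a]).trans (pvPerm3_bca a b c)

lemma pvGetD0 (x y z : Int) : PySem.List.pyGetD ([x,y,z] : List Int) 0 0 = x := rfl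
lemma pvGetD1 (x y z : Int) : PySem.List.pyGetD ([x,y,z] : List Int) 1 0 = y := rfl

lemma pvB_sorted (a b c : Int) (ys : List Int) (hp : ys.Perm [a,b,c])
    (hs : ys.Pairwise (· ≤ ·)) :
    sum_min_numbers_alt a b c = PySem.List.pyGetD ys 0 0 + PySem.List.pyGetD ys 1 0 := by
  unfold sum_min_numbers_alt
  dsimp only
  have h : PySem.List.sorted [a,b,c] (fun x => x) false = ys :=
    PySem.List.sorted_id_eq_of_perm_of_pairwise _ _ hp hs
  rw [h]

lemma pvB_eq (a b c : Int) : sum_min_numbers_alt a b c = a + b + c - max a (max b c) := by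
  rcases le_total a b with hab | hab <;> rcases le_total b c with hbc | hbc <;>
    rcases le_total a c with hac | hac
  · rw [pvB_sorted a b c [a,b,c] (List.Perm.refl _) (by simp [List.pairwise_cons]; omega),
      pvGetD0, pvGetD1]; omega
  · rw [pvB_sorted a b c [a,b,c] (List.Perm.refl _) (by simp [List.pairwise_cons]; omega),
      pvGetD0, pvGetD1]; omega
  · rw [pvB_sorted a b c [a,c,b] (pvPerm3_acb a b c) (by simp [List.pairwise_cons]; omega),
      pvGetD0, pvGetD1]; omega
  · rw [pvB_sorted a b c [c,a,b] (pvPerm3_cab a b c) (by simp [List.pairwise_cons]; omega),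
      pvGetD0, pvGetD1]; omega
  · rw [pvB_sorted a b c [b,a,c] (pvPerm3_bac a b c) (by simp [List.pairwise_cons]; omega),
      pvGetD0, pvGetD1]; omega
  · rw [pvB_sorted a b c [b,c,a] (pvPerm3_bca a b c) (by simp [List.pairwise_cons]; omega),
      pvGetD0, pvGetD1]; omega
  · rw [pvB_sorted a b c [a,b,c] (List.Perm.refl _) (by simp [List.pairwise_cons]; omega),
      pvGetD0, pvGetD1]; omega
  · rw [pvB_sorted a b c [c,b,a] (pvPerm3_cba a b c) (by simp [List.pairwise_cons]; omega),
      pvGetD0, pvGetD1]; omega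

-- ===== VERDICT (by name: the statement is the Claim_ definition above) =====
theorem sum_min_numbers_spec : Claim_equal_sum_min_numbers := by
  intro a b c _
  unfold Spec_sum_min_numbers
  rw [pvA_eq, pvB_eq]
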